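-- pv_equiv track=rewrite | github.com/jenaalsup/secom | 1c_spc_alarm_matrix.py | alarm_10x
-- ===== SOURCE A (Python) =====
-- def alarm_10x(feature, mean, num_consecutive=10):
--   result = [0] * len(feature)
--   curr_above = 0
--   curr_below = 0
--   for i, x in enumerate(feature):
--     if x > mean:
--       curr_above += 1
--       curr_below = 0
--     elif x < mean:
--       curr_below += 1
--       curr_above = 0
--     else:
--       curr_above = 0
--       curr_below = 0
--     if curr_above >= num_consecutive or curr_below >= num_consecutive:
--       result[i] = 1
--   return result
-- ===== SOURCE B (Python) =====
-- def alarm_10x(feature, mean, num_consecutive=10):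
--     n = len(feature)
--     if num_consecutive <= 0:
--         return [1] * n
--     signs = [(x > mean) - (x < mean) for x in feature]
--     result = []
--     i = 0
--     while i < n:
--         s = signs[i]
--         j = i
--         while j < n and signs[j] == s:
--             j += 1
--         L = j - i
--         if s == 0:
--             result += [0] * L
--         else:
--             m = min(num_consecutive - 1, L)
--             result += [0] * m + [1] * (L - m)
--         i = j
--     return result
-- ===== Notes on version B (the rewrite author's own statement) =====
-- stated objective: alternative
-- what changed: B replaces A's per-element above/below counter loop by a run decomposition: it maps each element to its sign vs the mean, splits the sign sequence into maximal runs, and emits each non-zero run's flags as a zero-block of length min(num_consecutive-1, run length) followed by a one-block (with the num_consecutive<=0 degenerate case flagging every index up front).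
import Mathlib
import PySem

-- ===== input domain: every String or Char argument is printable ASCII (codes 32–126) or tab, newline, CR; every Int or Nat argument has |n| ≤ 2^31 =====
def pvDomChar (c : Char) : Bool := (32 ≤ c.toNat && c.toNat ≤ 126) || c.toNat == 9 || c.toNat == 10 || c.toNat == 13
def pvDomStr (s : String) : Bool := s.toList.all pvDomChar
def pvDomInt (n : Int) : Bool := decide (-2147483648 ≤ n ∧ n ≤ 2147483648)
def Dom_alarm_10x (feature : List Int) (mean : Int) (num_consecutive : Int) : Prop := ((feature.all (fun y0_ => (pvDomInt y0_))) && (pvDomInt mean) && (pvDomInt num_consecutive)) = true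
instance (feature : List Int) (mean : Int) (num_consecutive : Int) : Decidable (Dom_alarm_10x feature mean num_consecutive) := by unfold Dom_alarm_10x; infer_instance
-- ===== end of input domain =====

-- B replaces A's element-by-element counter loop by a run-decomposition: it maps each
-- element to its sign vs the mean, splits the sign sequence into maximal runs, and emits
-- each run's flags as a zero-block followed by a one-block (objective: alternative).

-- ===== PORT A =====
-- one step of A's loop: state is (curr_above, curr_below, result)
def pvAStep (mean num_consecutive : Int) (st : Int × Int × List Int) (ix : Int × Int) : Int × Int × List Int :=
  let p : Int × Int :=
    if mean < ix.2 then (st.1 + 1, 0)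
    else if ix.2 < mean then (0, st.2.1 + 1)
    else (0, 0)
  (p.1, p.2,
    if num_consecutive ≤ p.1 ∨ num_consecutive ≤ p.2 then st.2.2.set ix.1.toNat 1 else st.2.2)

def alarm_10x (feature : List Int) (mean : Int) (num_consecutive : Int) : List Int :=
  ((PySem.List.enumerate feature 0).foldl (pvAStep mean num_consecutive)
    (0, 0, List.replicate feature.length 0)).2.2

-- ===== PORT B =====
-- sign of x relative to mean, Python's (x > mean) - (x < mean)
def pvSign (mean x : Int) : Int := (if mean < x then 1 else 0) - (if x < mean then 1 else 0)

-- B's outer loop: one iteration per maximal run of equal signs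
def pvRunsB (k : Int) : List Int → List Int
  | [] => []
  | s :: rest =>
    let L := (rest.takeWhile (· == s)).length + 1
    (if s = 0 then List.replicate L (0:Int)
     else List.replicate (min (k-1).toNat L) 0 ++ List.replicate (L - min (k-1).toNat L) 1)
    ++ pvRunsB k (rest.dropWhile (· == s))
termination_by l => l.length
decreasing_by exact Nat.lt_succ_of_le (List.length_dropWhile_le _ _)

def alarm_10x_alt (feature : List Int) (mean : Int) (num_consecutive : Int) : List Int :=
  if num_consecutive ≤ 0 then List.replicate feature.length 1
  else pvRunsB num_consecutive (feature.map (pvSign mean))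

-- ===== PRECONDITION & SPEC =====
def Spec_alarm_10x (feature : List Int) (mean : Int) (num_consecutive : Int) (out : List Int) : Prop := out = alarm_10x_alt feature mean num_consecutive
instance (feature : List Int) (mean : Int) (num_consecutive : Int) (out : List Int) : Decidable (Spec_alarm_10x feature mean num_consecutive out) := by unfold Spec_alarm_10x; infer_instance

-- ===== CLAIM (what is proved, stated in full; the proofs are below) =====
def Claim_equal_alarm_10x : Prop := ∀ (feature : List Int) (mean : Int) (num_consecutive : Int), Dom_alarm_10x feature mean num_consecutive → Spec_alarm_10x feature mean num_consecutive (alarm_10x feature mean num_consecutive)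

-- ===== LEMMAS AND PROOFS =====

-- A's loop, recast as structural recursion over the sign sequence
def pvH (k : Int) : List Int → Int → Int → List Int
  | [], _, _ => []
  | s :: ss, a, b =>
    let a' : Int := if s = 1 then a + 1 else 0
    let b' : Int := if s = -1 then b + 1 else 0
    (if k ≤ a' ∨ k ≤ b' then (1:Int) else 0) :: pvH k ss a' b'

-- flags produced inside a non-zero-sign run, count entering at c
def pvSeg (k : Int) (c : Int) : Nat → List Int
  | 0 => []
  | L + 1 => (if k ≤ c + 1 then (1:Int) else 0) :: pvSeg k (c + 1) L

-- A's foldl equals pvH over the signs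
theorem foldA (mean k : Int) (xs : List Int) : ∀ (i : Nat) (a b : Int) (res : List Int),
    res.length = i + xs.length →
    (∀ j (h : j < res.length), i ≤ j → res[j] = 0) →
    ((PySem.List.enumerate xs (i : Int)).foldl (pvAStep mean k) (a, b, res)).2.2
      = res.take i ++ pvH k (xs.map (pvSign mean)) a b := by
  induction xs with
  | nil =>
    intro i a b res hlen _
    have hle : res.length ≤ i := by simp at hlen; omega
    simp [PySem.List.enumerate, pvH, List.take_of_length_le hle]
  | cons x xs ih =>
    intro i a b res hlen hz
    rw [PySem.List.enumerate_cons]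
    simp only [List.foldl_cons]
    set a' : Int := if mean < x then a + 1 else 0 with ha'
    set b' : Int := if x < mean then b + 1 else 0 with hb'
    have hstep : pvAStep mean k (a, b, res) ((i : Int), x)
        = (a', b', if k ≤ a' ∨ k ≤ b' then res.set i 1 else res) := by
      simp only [pvAStep, ha', hb']
      by_cases h1 : mean < x
      · simp [h1, not_lt_of_gt h1]
      · by_cases h2 : x < mean <;> simp [h1, h2]
    have hilt : i < res.length := by simp at hlen; omega
    set res' : List Int := if k ≤ a' ∨ k ≤ b' then res.set i 1 else res with hres'
    have hrlen : res'.length = res.length := by rw [hres']; split <;> simp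
    have hlen' : res'.length = (i + 1) + xs.length := by simp at hlen; omega
    have hcases : res' = res.set i 1 ∨ res' = res := by
      rw [hres']; split
      · exact Or.inl rfl
      · exact Or.inr rfl
    have hz' : ∀ j (h : j < res'.length), i + 1 ≤ j → res'[j] = 0 := by
      intro j hj hij
      have hjr : j < res.length := by omega
      rcases hcases with h | h
      · simp only [h] at hj ⊢
        rw [List.getElem_set_ne (by omega)]
        exact hz j hjr (by omega)
      · simp only [h] at hj ⊢
        exact hz j hjr (by omega)
    have hcast : ((i : Int) + 1) = ((i + 1 : Nat) : Int) := by push_cast; ring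
    rw [hstep, hcast, ih (i+1) a' b' res' hlen' hz']
    have htake : res'.take (i+1) = res.take i ++ [if k ≤ a' ∨ k ≤ b' then (1:Int) else 0] := by
      rw [List.take_add_one]
      have ht : res'.take i = res.take i := by
        rcases hcases with h | h
        · rw [h, List.take_set, List.set_eq_of_length_le (by simp)]
        · rw [h]
      have hg : res'[i]? = some (if k ≤ a' ∨ k ≤ b' then (1:Int) else 0) := by
        by_cases hc : k ≤ a' ∨ k ≤ b'
        · have h : res' = res.set i 1 := by rw [hres', if_pos hc]
          simp only [h, hc, if_pos]
          simp [hilt]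
        · have h : res' = res := by rw [hres', if_neg hc]
          simp only [h, hc, if_false]
          rw [List.getElem?_eq_getElem hilt]
          simp [hz i hilt le_rfl]
      rw [ht, hg]; rfl
    rw [htake, List.append_assoc]
    congr 1
    have hsig : pvH k (pvSign mean x :: xs.map (pvSign mean)) a b
        = (if k ≤ a' ∨ k ≤ b' then (1:Int) else 0) :: pvH k (xs.map (pvSign mean)) a' b' := by
      simp only [pvH, pvSign, ha', hb']
      by_cases h1 : mean < x
      · simp [h1, not_lt_of_gt h1]
      · by_cases h2 : x < mean <;> simp [h1, h2]
    simp only [List.map_cons, hsig, List.singleton_append]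

theorem alarmA_eq_pvH (feature : List Int) (mean k : Int) :
    alarm_10x feature mean k = pvH k (feature.map (pvSign mean)) 0 0 := by
  unfold alarm_10x
  have := foldA mean k feature 0 0 0 (List.replicate feature.length 0)
    (by simp) (by intro j hj _; simp at hj ⊢)
  simpa using this

-- k ≤ 0: every index is flagged
theorem pvH_nonpos (k : Int) (hk : k ≤ 0) (ss : List Int) : ∀ a b : Int, 0 ≤ a → 0 ≤ b →
    pvH k ss a b = List.replicate ss.length 1 := by
  induction ss with
  | nil => intro a b _ _; rfl
  | cons s ss ih =>
    intro a b ha hb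
    simp only [pvH, List.length_cons, List.replicate_succ]
    congr 1
    · split_ifs <;> omega
    · apply ih <;> split_ifs <;> omega

-- reset lemmas: entering a run whose head is not the counted sign, the stale count is irrelevant
theorem pvH_reset_a (k : Int) (ss : List Int) (a : Int) (h : ∀ x ∈ ss.head?, x ≠ 1) :
    pvH k ss a 0 = pvH k ss 0 0 := by
  cases ss with
  | nil => rfl
  | cons s ss =>
    have hs : s ≠ 1 := h s rfl
    simp [pvH, hs]

theorem pvH_reset_b (k : Int) (ss : List Int) (b : Int) (h : ∀ x ∈ ss.head?, x ≠ -1) :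
    pvH k ss 0 b = pvH k ss 0 0 := by
  cases ss with
  | nil => rfl
  | cons s ss =>
    have hs : s ≠ -1 := h s rfl
    simp [pvH, hs]

-- zero-sign run contributes zeros
theorem pvH_zero_run (k : Int) (hk : 0 < k) (L : Nat) (rest : List Int) :
    pvH k (List.replicate L 0 ++ rest) 0 0 = List.replicate L 0 ++ pvH k rest 0 0 := by
  have hknot : ¬ k ≤ (0:Int) := by omega
  induction L with
  | zero => rfl
  | succ L ih => simp [List.replicate_succ, pvH, ih, hknot]

-- positive run: counts climb from a
theorem pvH_pos_run (k : Int) (_hk : 0 < k) (L : Nat) (rest : List Int) : ∀ a : Int,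
    pvH k (List.replicate L 1 ++ rest) a 0 = pvSeg k a L ++ pvH k rest (a + L) 0 := by
  induction L with
  | zero => intro a; simp [pvSeg]
  | succ L ih =>
    intro a
    have e1 : ((1:Int) = 1) = True := by simp
    have e2 : ((1:Int) = -1) = False := by decide
    simp only [List.replicate_succ, List.cons_append, pvH, pvSeg, e2, if_true, if_false]
    rw [ih (a+1)]
    congr 1
    · split_ifs <;> omega
    · congr 2
      push_cast; ring

-- negative run, symmetric
theorem pvH_neg_run (k : Int) (hk : 0 < k) (L : Nat) (rest : List Int) : ∀ b : Int,
    pvH k (List.replicate L (-1) ++ rest) 0 b = pvSeg k b L ++ pvH k rest 0 (b + L) := by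
  induction L with
  | zero => intro b; simp [pvSeg]
  | succ L ih =>
    intro b
    have e1 : ((-1:Int) = -1) = True := by simp
    have e2 : ((-1:Int) = 1) = False := by decide
    simp only [List.replicate_succ, List.cons_append, pvH, pvSeg, e2, if_true, if_false]
    rw [ih (b+1)]
    congr 1
    · split_ifs <;> omega
    · congr 2
      push_cast; ring

-- closed form of a run's flags, starting count c ≥ 0
theorem pvSeg_closed (k : Int) (_hk : 0 < k) (L : Nat) : ∀ c : Int, 0 ≤ c →
    pvSeg k c L = List.replicate (min (k-1-c).toNat L) 0 ++ List.replicate (L - min (k-1-c).toNat L) 1 := by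
  induction L with
  | zero => intro c _; simp [pvSeg]
  | succ L ih =>
    intro c hc
    simp only [pvSeg]
    by_cases h : k ≤ c + 1
    · have h0 : (k-1-c).toNat = 0 := by omega
      have h0' : (k-1-(c+1)).toNat = 0 := by omega
      rw [ih (c+1) (by omega)]
      simp [h, h0, h0', List.replicate_succ]
    · have hm : (k-1-c).toNat = (k-1-(c+1)).toNat + 1 := by omega
      rw [ih (c+1) (by omega)]
      set m := (k-1-(c+1)).toNat with hmdef
      have hmin : min (m+1) (L+1) = min m L + 1 := by omega
      have hsub : L + 1 - (min m L + 1) = L - min m L := by omega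
      simp only [h, if_false, hm, hmin, hsub, List.replicate_succ, List.cons_append]

theorem head_dropWhile_ne (p : Int → Bool) (l : List Int) :
    ∀ x ∈ (l.dropWhile p).head?, p x = false := by
  induction l with
  | nil => intro x hx; simp at hx
  | cons y l ih =>
    intro x hx
    by_cases h : p y
    · rw [List.dropWhile_cons_of_pos h] at hx; exact ih x hx
    · rw [List.dropWhile_cons_of_neg h] at hx
      simp at hx
      subst hx
      simpa using h

-- main B-side lemma
theorem pvH_eq_runs (k : Int) (hk : 0 < k) : ∀ n (ss : List Int), ss.length ≤ n →
    (∀ x ∈ ss, x = -1 ∨ x = 0 ∨ x = 1) → pvH k ss 0 0 = pvRunsB k ss := by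
  intro n
  induction n with
  | zero =>
    intro ss hn _
    cases ss with
    | nil => simp [pvH, pvRunsB]
    | cons s rest => simp at hn
  | succ n ih =>
    intro ss hn hmem
    cases ss with
    | nil => simp [pvH, pvRunsB]
    | cons s rest =>
      set run := rest.takeWhile (· == s) with hrun
      set rest' := rest.dropWhile (· == s) with hrest'
      have hsplit : rest = run ++ rest' := (List.takeWhile_append_dropWhile).symm
      have hrunrep : run = List.replicate run.length s := by
        apply List.eq_replicate_of_mem
        intro b hb
        have := List.mem_takeWhile_imp hb
        simpa using this
      have hrest'len : rest'.length ≤ rest.length := List.length_dropWhile_le _ _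
      have hrest'mem : ∀ x ∈ rest', x = -1 ∨ x = 0 ∨ x = 1 := by
        intro x hx
        apply hmem
        rw [hsplit]
        exact List.mem_cons_of_mem _ (List.mem_append_right _ hx)
      have hIH : pvH k rest' 0 0 = pvRunsB k rest' := by
        have h2 : rest.length + 1 ≤ n + 1 := by simpa using hn
        exact ih rest' (by omega) hrest'mem
      have hhead : ∀ x ∈ rest'.head?, (x == s) = false := by
        rw [hrest']; exact head_dropWhile_ne _ rest
      have hcons : s :: rest = List.replicate (run.length + 1) s ++ rest' := by
        rw [hsplit, List.replicate_succ, List.cons_append, ← hrunrep]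
      rw [pvRunsB]
      simp only [← hrun, ← hrest']
      rcases hmem s (List.mem_cons_self) with hs | hs | hs
      · -- s = -1 : negative run
        have hne : ∀ x ∈ rest'.head?, x ≠ -1 := by
          intro x hx
          have := hhead x hx
          rw [hs] at this
          simpa using this
        rw [hs] at hcons ⊢
        rw [hcons, pvH_neg_run k hk (run.length + 1) rest' 0,
            pvSeg_closed k hk _ 0 le_rfl,
            pvH_reset_b k rest' _ hne, hIH]
        have hz : ¬ ((-1:Int) = 0) := by decide
        simp only [hz, if_false]
        congr 3 <;> omega
      · -- s = 0 : zero run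
        rw [hs] at hcons ⊢
        rw [hcons, pvH_zero_run k hk, hIH]
        simp
      · -- s = 1 : positive run
        have hne : ∀ x ∈ rest'.head?, x ≠ 1 := by
          intro x hx
          have := hhead x hx
          rw [hs] at this
          simpa using this
        rw [hs] at hcons ⊢
        rw [hcons, pvH_pos_run k hk (run.length + 1) rest' 0,
            pvSeg_closed k hk _ 0 le_rfl,
            pvH_reset_a k rest' _ hne, hIH]
        have hz : ¬ ((1:Int) = 0) := by decide
        simp only [hz, if_false]
        congr 3 <;> omega

theorem pvSign_mem (mean : Int) (x : Int) : pvSign mean x = -1 ∨ pvSign mean x = 0 ∨ pvSign mean x = 1 := by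
  unfold pvSign
  split_ifs <;> simp

-- ===== VERDICT (by name: the statement is the Claim_ definition above) =====
theorem alarm_10x_spec : Claim_equal_alarm_10x := by
  intro feature mean k _
  unfold Spec_alarm_10x alarm_10x_alt
  rw [alarmA_eq_pvH]
  by_cases hk : k ≤ 0
  · rw [if_pos hk, pvH_nonpos k hk _ 0 0 le_rfl le_rfl]
    simp
  · rw [if_neg hk]
    apply pvH_eq_runs k (by omega) (feature.map (pvSign mean)).length _ le_rfl
    intro x hx
    simp at hx
    obtain ⟨y, _, hy⟩ := hx
    rw [← hy]; exact pvSign_mem mean y
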